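-- pv_equiv track=rewrite | github.com/wehnsdaefflae/rebalancing | source/experiments/optimizer/my_optimizer.py | get_sub_spaces
-- ===== SOURCE A (Python) =====
-- def get_sub_spaces(parameter_range, pivot_point):
--     indices = []
--     for i in range(2 ** len(parameter_range)):
--         format_string = "{:0" + str(len(parameter_range)) + "b}"
--         binary_string = format_string.format(i)
--         indices.append([int(x) for x in binary_string])
--
--     sub_spaces = []
--     for i, each_indices in enumerate(indices):
--         each_range = [list(x) for x in parameter_range]
--         for j, each_index in enumerate(each_indices):
--             each_range[j][each_index] = pivot_point[j]
--         each_range = tuple(each_range)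
--         sub_spaces.append(each_range)
--
--     return sub_spaces
-- ===== SOURCE B (Python) =====
-- def get_sub_spaces(parameter_range, pivot_point):
--     # incremental construction: one pass per parameter, doubling the partial
--     # subspaces (bit-0 variant before bit-1 variant), instead of decoding
--     # each i in range(2**n) into a binary string
--     partials = [[]]
--     for j, rng in enumerate(parameter_range):
--         nxt = []
--         for p in partials:
--             r0 = list(rng)
--             r0[0] = pivot_point[j]
--             r1 = list(rng)
--             r1[1] = pivot_point[j]
--             nxt.append(p + [r0])
--             nxt.append(p + [r1])
--         partials = nxt
--     return [tuple(p) for p in partials]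
-- ===== Notes on version B (the rewrite author's own statement) =====
-- stated objective: alternative
-- what changed: B builds the 2^n subspaces incrementally (doubling a list of partial subspaces per parameter, bit-0 variant before bit-1) instead of decoding each i in range(2**n) into a zero-padded binary string and patching a fresh copy of the whole space per index.
import Mathlib
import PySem

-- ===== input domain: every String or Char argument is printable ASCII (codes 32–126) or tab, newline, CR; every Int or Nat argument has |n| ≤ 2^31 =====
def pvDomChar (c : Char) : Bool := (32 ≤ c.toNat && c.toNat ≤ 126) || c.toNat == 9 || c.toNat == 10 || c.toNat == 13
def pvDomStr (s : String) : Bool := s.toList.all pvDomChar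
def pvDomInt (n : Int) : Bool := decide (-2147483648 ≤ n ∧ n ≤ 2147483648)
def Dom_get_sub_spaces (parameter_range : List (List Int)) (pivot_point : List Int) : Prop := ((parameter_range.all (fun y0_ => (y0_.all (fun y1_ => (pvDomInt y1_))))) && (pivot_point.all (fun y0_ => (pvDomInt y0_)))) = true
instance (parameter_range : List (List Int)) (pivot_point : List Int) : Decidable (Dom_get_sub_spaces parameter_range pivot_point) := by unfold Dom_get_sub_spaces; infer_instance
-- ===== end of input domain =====

-- B builds the 2^n subspaces incrementally (doubling partial subspaces per parameter)
-- instead of decoding each i in range(2**n) into a binary string; same cost, different decomposition.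


-- ===== PORT A =====
-- "{:0<w>b}".format(i) for 0 ≤ i, read back as a list of 0/1 ints:
-- binary digits of i (at least one digit), left-padded with 0 to width w (exact for i ≥ 0).
def binCore : Nat → List Int
  | 0 => []
  | n+1 => binCore ((n+1)/2) ++ [((((n+1) % 2 : Nat)) : Int)]

def padBin (w i : Nat) : List Int :=
  let b := if i = 0 then [(0 : Int)] else binCore i
  List.replicate (w - b.length) 0 ++ b

-- each_range[j][each_index] = pivot_point[j] — exact under Pre_ (indices nonnegative and in range)
def applyIdx (pivot_point : List Int) (er : List (List Int)) (jb : Int × Int) : List (List Int) :=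
  er.set jb.1.toNat ((er.getD jb.1.toNat []).set jb.2.toNat (pivot_point.getD jb.1.toNat 0))

def get_sub_spaces (parameter_range : List (List Int)) (pivot_point : List Int) : List (List (List Int)) :=
  ((PySem.List.pyRange 0 ((2 : Int) ^ parameter_range.length)).map
      (fun i => padBin parameter_range.length i.toNat)).foldl
    (fun acc bs =>
      acc ++ [(PySem.List.enumerate bs).foldl (applyIdx pivot_point)
                (parameter_range.map (fun x => x))]) []

-- ===== PORT B =====
def get_sub_spaces_alt (parameter_range : List (List Int)) (pivot_point : List Int) : List (List (List Int)) :=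
  ((PySem.List.enumerate parameter_range).foldl
      (fun ps jr =>
        ps.foldl (fun acc p =>
          acc ++ [p ++ [jr.2.set 0 (pivot_point.getD jr.1.toNat 0)],
                  p ++ [jr.2.set 1 (pivot_point.getD jr.1.toNat 0)]]) [])
      [[]]).map (fun p => p)

-- ===== PRECONDITION & SPEC =====
-- Pre_ excludes exactly the inputs on which the Python A raises IndexError:
-- an empty parameter_range, an inner range with fewer than 2 entries, or a pivot_point
-- shorter than parameter_range.
def Pre_get_sub_spaces (parameter_range : List (List Int)) (pivot_point : List Int) : Prop :=
  parameter_range ≠ [] ∧ (∀ r ∈ parameter_range, 2 ≤ r.length) ∧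
    parameter_range.length ≤ pivot_point.length
instance (parameter_range : List (List Int)) (pivot_point : List Int) : Decidable (Pre_get_sub_spaces parameter_range pivot_point) := by unfold Pre_get_sub_spaces; infer_instance

def pvWitness_get_sub_spaces : List (List Int) × List Int := ([[1, 2], [3, 4]], [0, 5])

def Spec_get_sub_spaces (parameter_range : List (List Int)) (pivot_point : List Int) (out : List (List (List Int))) : Prop := out = get_sub_spaces_alt parameter_range pivot_point
instance (parameter_range : List (List Int)) (pivot_point : List Int) (out : List (List (List Int))) : Decidable (Spec_get_sub_spaces parameter_range pivot_point out) := by unfold Spec_get_sub_spaces; infer_instance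

-- ===== CLAIM (what is proved, stated in full; the proofs are below) =====
def Claim_equal_get_sub_spaces : Prop := ∀ (parameter_range : List (List Int)) (pivot_point : List Int), Dom_get_sub_spaces parameter_range pivot_point → Pre_get_sub_spaces parameter_range pivot_point → Spec_get_sub_spaces parameter_range pivot_point (get_sub_spaces parameter_range pivot_point)

-- ===== LEMMAS AND PROOFS =====

-- the common value: entry j of the subspace is parameter_range[j] with slot bs[j] replaced by pivot_point[j]
def zspec : List (List Int) → List Int → List Int → List (List Int)
  | [], _, _ => []
  | r :: pr, p :: pp, b :: bs => r.set b.toNat p :: zspec pr pp bs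
  | r :: pr, _, _ => r :: pr

-- all length-n bit strings in counting order, most significant bit first
def allBits : Nat → List (List Int)
  | 0 => [[]]
  | n+1 => (allBits n).flatMap (fun b => [b ++ [0], b ++ [1]])

theorem zspec_nil (l : List (List Int)) (pp : List Int) : zspec l pp [] = l := by
  cases l <;> simp [zspec]

theorem binCore_zero : binCore 0 = [] := by simp [binCore]

theorem binCore_pos (i : Nat) (h : 0 < i) :
    binCore i = binCore (i / 2) ++ [(((i % 2 : Nat)) : Int)] := by
  cases i with
  | zero => omega
  | succ n => simp [binCore]

theorem padBin_succ (n i : Nat) (hn : 1 ≤ n) :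
    padBin (n + 1) i = padBin n (i / 2) ++ [(((i % 2 : Nat)) : Int)] := by
  match i with
  | 0 =>
    simp only [padBin]
    have : n + 1 - 1 = (n - 1) + 1 := by omega
    simp [this, List.replicate_succ']
  | 1 =>
    have h1 : binCore 1 = [1] := by rw [binCore_pos 1 one_pos]; simp [binCore_zero]
    simp only [padBin, h1]
    norm_num
    have : List.replicate n (0 : Int) = List.replicate (n - 1) (0 : Int) ++ [0] := by
      rw [← List.replicate_succ']; congr 1; omega
    rw [this]; simp
  | (m+2) =>
    have h2 : 0 < m + 2 := by omega
    have hq : 0 < (m + 2) / 2 := by omega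
    simp only [padBin, if_neg (by omega : ¬ m + 2 = 0), if_neg (by omega : ¬ (m+2)/2 = 0)]
    rw [binCore_pos (m + 2) h2]
    simp only [List.length_append, List.length_cons, List.length_nil]
    have : n + 1 - ((binCore ((m + 2) / 2)).length + (0 + 1)) = n - (binCore ((m + 2) / 2)).length := by omega
    rw [this, ← List.append_assoc]

def idxList (n : Nat) : List (List Int) := (List.range (2 ^ n)).map (padBin n)

theorem range_pair {α : Type} (m : Nat) (f : Nat → α) :
    (List.range (2 * m)).map f = (List.range m).flatMap (fun k => [f (2 * k), f (2 * k + 1)]) := by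
  induction m with
  | zero => rfl
  | succ m ih =>
    have : 2 * (m + 1) = (2 * m + 1) + 1 := by omega
    rw [this, List.range_succ, List.range_succ, List.range_succ]
    simp [ih]

theorem idxList_succ (n : Nat) (hn : 1 ≤ n) :
    idxList (n + 1) = (idxList n).flatMap (fun b => [b ++ [0], b ++ [1]]) := by
  unfold idxList
  have h2 : 2 ^ (n + 1) = 2 * 2 ^ n := by ring
  rw [h2, range_pair, List.flatMap_map]
  apply List.flatMap_congr
  intro k _
  have e0 : (2 * k) / 2 = k := by omega
  have e1 : (2 * k + 1) / 2 = k := by omega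
  have m0 : (2 * k) % 2 = 0 := by omega
  have m1 : (2 * k + 1) % 2 = 1 := by omega
  rw [padBin_succ n (2 * k) hn, padBin_succ n (2 * k + 1) hn, e0, e1, m0, m1]
  norm_num

theorem padBin_one_zero : padBin 1 0 = [0] := by simp [padBin]

theorem padBin_one_one : padBin 1 1 = [1] := by
  have h1 : binCore 1 = [1] := by rw [binCore_pos 1 one_pos]; simp [binCore_zero]
  simp [padBin, h1]

theorem idxList_eq : ∀ (n : Nat), 1 ≤ n → idxList n = allBits n := by
  intro n
  induction n with
  | zero => intro h; omega
  | succ n ih =>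
    intro _
    by_cases hn : n = 0
    · subst hn
      show (List.range 2).map (padBin 1) = allBits 1
      rw [show (2 : Nat) = 1 + 1 from rfl, List.range_succ, List.range_succ, List.range_zero]
      simp [padBin_one_zero, padBin_one_one, allBits]
    · rw [idxList_succ n (by omega), ih (by omega)]
      rfl

theorem allBits_length : ∀ (n : Nat) (bs : List Int), bs ∈ allBits n → bs.length = n := by
  intro n
  induction n with
  | zero => intro bs h; simp [allBits] at h; simp [h]
  | succ n ih =>
    intro bs h
    simp only [allBits, List.mem_flatMap, List.mem_cons] at h
    obtain ⟨b, hb, hmem⟩ := h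
    have := ih b hb
    rcases hmem with h | h | h <;> simp_all
theorem allBits_cons (n : Nat) :
    allBits (n + 1) = (allBits n).map (fun b => 0 :: b) ++ (allBits n).map (fun b => 1 :: b) := by
  induction n with
  | zero => rfl
  | succ n ih =>
    show (allBits (n + 1)).flatMap _ = _
    conv_lhs => rw [ih]
    rw [show allBits (n + 1) = (allBits n).flatMap (fun b => [b ++ [0], b ++ [1]]) from rfl]
    simp only [List.flatMap_append, List.flatMap_map, List.map_flatMap]
    rfl

theorem innerA (pp : List Int) : ∀ (bs : List Int) (k : Nat) (er : List (List Int)),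
    k + bs.length ≤ er.length → k + bs.length ≤ pp.length →
    (PySem.List.enumerate bs (k : Int)).foldl (applyIdx pp) er
      = er.take k ++ zspec (er.drop k) (pp.drop k) bs := by
  intro bs
  induction bs with
  | nil =>
    intro k er _ _
    simp [PySem.List.enumerate_nil, zspec_nil, List.take_append_drop]
  | cons b bs ih =>
    intro k er h1 h2
    simp only [List.length_cons] at h1 h2
    have hk1 : k < er.length := by omega
    have hk2 : k < pp.length := by omega
    rw [PySem.List.enumerate_cons]
    simp only [List.foldl_cons]
    have hcast : (k : Int) + 1 = ((k + 1 : Nat) : Int) := by push_cast; ring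
    rw [hcast]
    set v : List Int := (er.getD k []).set b.toNat (pp.getD k 0) with hv
    have happ : applyIdx pp er ((k : Int), b) = er.set k v := by
      simp [applyIdx, hv, List.getD_eq_getElem?_getD]
    rw [happ]
    rw [ih (k + 1) (er.set k v) (by simp only [List.length_set]; omega) (by omega)]
    have hdrop : (er.set k v).drop (k + 1) = er.drop (k + 1) := by
      rw [List.drop_set]; simp
    have htake : (er.set k v).take (k + 1) = er.take k ++ [v] := by
      rw [List.take_add_one, List.take_set,
        List.set_eq_of_length_le (by simp)]
      rw [List.getElem?_set_self (by simpa using hk1)]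
      rfl
    rw [hdrop, htake]
    have hverd : er.drop k = er[k] :: er.drop (k + 1) := (List.getElem_cons_drop hk1).symm
    have hppd : pp.drop k = pp[k] :: pp.drop (k + 1) := (List.getElem_cons_drop hk2).symm
    rw [hverd, hppd]
    show er.take k ++ [v] ++ _ = er.take k ++ (er[k].set b.toNat pp[k] :: _)
    have hv' : v = er[k].set b.toNat pp[k] := by
      rw [hv, List.getD_eq_getElem?_getD, List.getD_eq_getElem?_getD,
        List.getElem?_eq_getElem hk1, List.getElem?_eq_getElem hk2]
      rfl
    rw [hv', List.append_assoc]
    rfl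

theorem outerB (pp : List Int) : ∀ (prs : List (List Int)) (k : Nat) (ps : List (List (List Int))),
    k + prs.length ≤ pp.length →
    (PySem.List.enumerate prs (k : Int)).foldl
        (fun ps jr =>
          ps.foldl (fun acc p =>
            acc ++ [p ++ [jr.2.set 0 (pp.getD jr.1.toNat 0)],
                    p ++ [jr.2.set 1 (pp.getD jr.1.toNat 0)]]) [])
        ps
      = ps.flatMap (fun p => (allBits prs.length).map (fun bs => p ++ zspec prs (pp.drop k) bs)) := by
  intro prs
  induction prs with
  | nil =>
    intro k ps _
    simp [PySem.List.enumerate_nil, allBits, zspec_nil]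
  | cons r prs ih =>
    intro k ps h
    simp only [List.length_cons] at h
    have hk : k < pp.length := by omega
    rw [PySem.List.enumerate_cons]
    simp only [List.foldl_cons]
    rw [PySem.List.foldl_append_eq_flatMap
      (fun p => [p ++ [r.set 0 (pp.getD ((k : Int)).toNat 0)], p ++ [r.set 1 (pp.getD ((k : Int)).toNat 0)]]) ps []]
    have hcast : (k : Int) + 1 = ((k + 1 : Nat) : Int) := by push_cast; ring
    rw [hcast, List.nil_append, ih (k + 1) _ (by omega)]
    rw [List.flatMap_assoc]
    have hppd : pp.drop k = pp[k] :: pp.drop (k + 1) := (List.getElem_cons_drop hk).symm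
    have hget : pp.getD ((k : Int)).toNat 0 = pp[k] := by
      simp [List.getD_eq_getElem?_getD, List.getElem?_eq_getElem hk]
    apply List.flatMap_congr
    intro p _
    show List.flatMap _ [p ++ [r.set 0 _], p ++ [r.set 1 _]] = _
    rw [List.length_cons, allBits_cons (prs.length), List.map_append, List.map_map, List.map_map]
    simp only [List.flatMap_cons, List.flatMap_nil, List.append_nil]
    congr 1
    · apply List.map_congr_left
      intro bs _
      rw [hppd]
      show p ++ [r.set (0 : Int).toNat (pp.getD ((k : Int)).toNat 0)] ++ _
        = p ++ zspec (r :: prs) (pp[k] :: pp.drop (k + 1)) ((0 : Int) :: bs)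
      rw [hget, List.append_assoc]
      rfl
    · apply List.map_congr_left
      intro bs _
      rw [hppd]
      show p ++ [r.set (1 : Int).toNat (pp.getD ((k : Int)).toNat 0)] ++ _
        = p ++ zspec (r :: prs) (pp[k] :: pp.drop (k + 1)) ((1 : Int) :: bs)
      rw [hget, List.append_assoc]
      rfl

-- ===== VERDICT (by name: the statement is the Claim_ definition above) =====
theorem get_sub_spaces_spec : Claim_equal_get_sub_spaces := by
  intro pr pp _ hpre
  obtain ⟨hne, _, hlen⟩ := hpre
  unfold Spec_get_sub_spaces get_sub_spaces get_sub_spaces_alt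
  have hn : 1 ≤ pr.length := by
    cases pr with
    | nil => exact absurd rfl hne
    | cons a l => simp
  have hpow : (2 : Int) ^ pr.length = ((2 ^ pr.length : Nat) : Int) := by push_cast; ring
  have hidx : (PySem.List.pyRange 0 ((2 : Int) ^ pr.length)).map
      (fun i => padBin pr.length i.toNat) = allBits pr.length := by
    rw [hpow, PySem.List.pyRange_zero_nat, List.map_map, ← idxList_eq pr.length hn, idxList]
    exact List.map_congr_left (fun k _ => by simp)
  rw [PySem.List.foldl_append_singleton_eq_map, List.nil_append, hidx]
  have hB := outerB pp pr 0 [[]] (by omega)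
  simp only [Nat.cast_zero, List.drop_zero] at hB
  rw [hB]
  simp only [List.flatMap_cons, List.flatMap_nil, List.append_nil, List.nil_append, List.map_map]
  apply List.map_congr_left
  intro bs hbs
  have hlbs : bs.length = pr.length := allBits_length pr.length bs hbs
  have hA := innerA pp bs 0 (pr.map (fun x => x))
    (by simp only [List.length_map]; omega) (by omega)
  simp only [Nat.cast_zero, List.drop_zero, List.take_zero, List.nil_append] at hA
  show List.foldl (applyIdx pp) (pr.map (fun x => x)) (PySem.List.enumerate bs) = zspec pr pp bs
  rw [hA, List.map_id']
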